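-- pv_equiv track=rewrite | github.com/polinatrump/book_recommendation | dataset_preprocessing.py | genre_binary
-- ===== SOURCE A (Python) =====
-- def genre_binary(book_genre_list, all_genres_list):
--     binary_list = []
--     if type(book_genre_list) == list:
--         for genre in all_genres_list:
--             if genre in book_genre_list:
--                 binary_list.append(1)
--             else:
--                 binary_list.append(0)
--         return binary_list
--     else:
--         return None
-- ===== SOURCE B (Python) =====
-- def genre_binary(book_genre_list, all_genres_list):
--     if type(book_genre_list) != list:
--         return None
--     result = [0] * len(all_genres_list)
--     positions = {}
--     for i, genre in enumerate(all_genres_list):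
--         positions.setdefault(genre, []).append(i)
--     for genre in book_genre_list:
--         for p in positions.get(genre, []):
--             result[p] = 1
--     return result
-- ===== Notes on version B (the rewrite author's own statement) =====
-- stated objective: faster
-- what changed: Replaces the per-slot membership scan over book_genre_list with an inverted traversal: a genre->positions index built from all_genres_list in one pass, then a single pass over book_genre_list setting the indexed positions of a pre-allocated zero vector.
import Mathlib
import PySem

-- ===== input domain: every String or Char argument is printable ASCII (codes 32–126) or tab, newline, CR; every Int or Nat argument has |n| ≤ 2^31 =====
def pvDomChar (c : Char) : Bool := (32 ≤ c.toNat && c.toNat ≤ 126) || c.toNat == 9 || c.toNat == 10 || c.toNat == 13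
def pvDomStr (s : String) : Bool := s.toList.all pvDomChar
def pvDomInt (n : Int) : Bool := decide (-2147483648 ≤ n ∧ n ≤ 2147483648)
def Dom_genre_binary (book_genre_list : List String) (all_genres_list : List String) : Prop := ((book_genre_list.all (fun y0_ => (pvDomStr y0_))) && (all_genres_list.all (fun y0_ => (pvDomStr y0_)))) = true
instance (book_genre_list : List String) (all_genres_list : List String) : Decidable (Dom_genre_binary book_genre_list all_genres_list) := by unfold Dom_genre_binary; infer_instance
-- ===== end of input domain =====

-- B replaces the per-slot membership scan with an inverted traversal (genre→positions index
-- built once, then one pass over book_genre_list marking a pre-allocated zero vector);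
-- same return value; measured faster in a timing run.

-- ===== PORT A =====
-- `type(book_genre_list) == list` is always true under the List String typing, so the
-- `return None` branch is unreachable; the loop appends 1 or 0 per genre of all_genres_list.
def genre_binary (book_genre_list : List String) (all_genres_list : List String) : Option (List Int) :=
  some (all_genres_list.foldl
    (fun binary_list genre =>
      if book_genre_list.contains genre then binary_list ++ [(1 : Int)]
      else binary_list ++ [(0 : Int)]) [])

-- ===== PORT B =====
-- positions = {}; for i, genre in enumerate(all_genres_list): positions.setdefault(genre, []).append(i)
def pvBuildPositions (all_genres_list : List String) : PySem.Dict String (List Int) :=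
  (PySem.List.enumerate all_genres_list).foldl
    (fun d p => d.modify p.2 [] (fun l => l ++ [p.1])) PySem.Dict.empty

-- result = [0]*len(...); for genre in book: for p in positions.get(genre, []): result[p] = 1
-- (pySetD is exact for these indices: enumerate only produces in-range non-negative positions)
def genre_binary_alt (book_genre_list : List String) (all_genres_list : List String) : Option (List Int) :=
  let result := List.replicate all_genres_list.length (0 : Int)
  let positions := pvBuildPositions all_genres_list
  some (book_genre_list.foldl
    (fun r genre => ((positions.getD genre []).foldl
      (fun r p => PySem.List.pySetD r p 1) r)) result)

-- ===== PRECONDITION & SPEC =====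
def Spec_genre_binary (book_genre_list : List String) (all_genres_list : List String) (out : Option (List Int)) : Prop := out = genre_binary_alt book_genre_list all_genres_list
instance (book_genre_list : List String) (all_genres_list : List String) (out : Option (List Int)) : Decidable (Spec_genre_binary book_genre_list all_genres_list out) := by unfold Spec_genre_binary; infer_instance

-- ===== CLAIM (what is proved, stated in full; the proofs are below) =====
def Claim_equal_genre_binary : Prop := ∀ (book_genre_list : List String) (all_genres_list : List String), Dom_genre_binary book_genre_list all_genres_list → Spec_genre_binary book_genre_list all_genres_list (genre_binary book_genre_list all_genres_list)

-- ===== LEMMAS AND PROOFS =====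

-- membership in PySem.List.enumerate
theorem pv_mem_enumerate {α : Type} (xs : List α) (s : Int) (p : Int × α) :
    p ∈ PySem.List.enumerate xs s ↔ ∃ k : Nat, ∃ h : k < xs.length, p.1 = s + k ∧ p.2 = xs[k] := by
  induction xs generalizing s with
  | nil => simp [PySem.List.enumerate]
  | cons x xs ih =>
    rw [PySem.List.enumerate_cons]
    constructor
    · intro hp
      rcases List.mem_cons.mp hp with h | h
      · exact ⟨0, by simp, by simp [h]⟩
      · rcases (ih (s + 1)).mp h with ⟨k, hk, h1, h2⟩
        exact ⟨k + 1, by simpa using hk, by push_cast; omega, by simpa using h2⟩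
    · rintro ⟨k, hk, h1, h2⟩
      cases k with
      | zero =>
        simp at h1 h2
        exact List.mem_cons.mpr (Or.inl (Prod.ext h1 h2))
      | succ k =>
        right
        refine (ih (s + 1)).mpr ⟨k, by simpa using hk, by push_cast at h1 ⊢; omega, by simpa using h2⟩

-- what the index dict holds at a key: the positions of that genre
theorem pv_pos_getD (all : List String) (g : String) :
    (pvBuildPositions all).getD g [] =
      ((PySem.List.enumerate all).filter (fun p => p.2 == g)).map (·.1) := by
  unfold pvBuildPositions
  have hfold :
      (PySem.List.enumerate all).foldl
        (fun d p => d.modify p.2 [] (fun l => l ++ [p.1])) PySem.Dict.empty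
      = ((PySem.List.enumerate all).map (fun p => (p.2, p.1))).foldl
        (fun d q => d.modify q.1 [] (fun l => l ++ [q.2])) PySem.Dict.empty := by
    rw [List.foldl_map]
  rw [hfold, PySem.Dict.getD_foldl_modify_append]
  simp [List.filter_map, List.map_map, Function.comp_def]

theorem pv_mem_pos (all : List String) (g : String) (p : Int) :
    p ∈ (pvBuildPositions all).getD g [] ↔
      ∃ k : Nat, ∃ h : k < all.length, p = (k : Int) ∧ all[k] = g := by
  rw [pv_pos_getD]
  simp only [List.mem_map, List.mem_filter]
  constructor
  · rintro ⟨q, ⟨hq, hg⟩, rfl⟩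
    rcases (pv_mem_enumerate all 0 q).mp hq with ⟨k, hk, h1, h2⟩
    exact ⟨k, hk, by omega, by rw [← h2]; exact (beq_iff_eq.mp hg)⟩
  · rintro ⟨k, hk, rfl, hg⟩
    exact ⟨((k : Int), all[k]), ⟨(pv_mem_enumerate all 0 _).mpr ⟨k, hk, by omega, rfl⟩,
      beq_iff_eq.mpr hg⟩, rfl⟩

-- marking loop: length is preserved
theorem pv_fold_set_length (ps : List Int) (r : List Int) :
    (ps.foldl (fun r p => PySem.List.pySetD r p 1) r).length = r.length := by
  induction ps generalizing r with
  | nil => rfl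
  | cons p ps ih => simp [List.foldl_cons, ih, PySem.List.length_pySetD]

-- marking loop, pointwise: position i becomes 1 exactly if i occurs in ps
theorem pv_fold_set_getElem (ps : List Int) (r : List Int) (hnn : ∀ p ∈ ps, 0 ≤ p)
    (i : Nat) (hi : i < r.length) :
    (ps.foldl (fun r p => PySem.List.pySetD r p 1) r)[i]? = some (if (i : Int) ∈ ps then 1 else r[i]) := by
  induction ps generalizing r with
  | nil => simp [List.getElem?_eq_getElem hi]
  | cons p ps ih =>
    have hp : 0 ≤ p := hnn p (List.mem_cons_self ..)
    have hstep : PySem.List.pySetD r p 1 = r.set p.toNat 1 :=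
      PySem.List.pySetD_of_nonneg r 1 hp
    have hi' : i < (PySem.List.pySetD r p 1).length := by
      rw [PySem.List.length_pySetD]; exact hi
    rw [List.foldl_cons, ih _ (fun q hq => hnn q (List.mem_cons_of_mem _ hq)) hi']
    have hset : (PySem.List.pySetD r p 1)[i]? = some (if (i : Int) = p then (1 : Int) else r[i]) := by
      by_cases hip : (i : Int) = p
      · have hpt : p.toNat = i := by omega
        rw [hstep]; simp [hpt, hip, hi]
      · have hpt : p.toNat ≠ i := by omega
        rw [hstep]; simp [hpt, hip, List.getElem?_eq_getElem hi]
    have h2 : (PySem.List.pySetD r p 1)[i]'hi' = if (i : Int) = p then (1 : Int) else r[i] :=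
      Option.some.inj (by rw [← List.getElem?_eq_getElem hi', hset])
    rw [h2]
    simp only [List.mem_cons]
    by_cases hip : (i : Int) = p <;> by_cases hmem : (i : Int) ∈ ps <;> simp [hip, hmem]

-- marking all positions of one genre on a mapped vector
theorem pv_step_map (all : List String) (f : String → Int) (g0 : String) :
    ((pvBuildPositions all).getD g0 []).foldl (fun r p => PySem.List.pySetD r p 1) (all.map f)
      = all.map (fun g => if g == g0 then 1 else f g) := by
  have hnn : ∀ p ∈ (pvBuildPositions all).getD g0 [], 0 ≤ p := by
    intro p hp
    rcases (pv_mem_pos all g0 p).mp hp with ⟨k, _, rfl, _⟩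
    omega
  apply List.ext_getElem
  · rw [pv_fold_set_length]; simp
  · intro i hi1 hi2
    have hia : i < all.length := by simpa using hi2
    have him : i < (all.map f).length := by simpa using hia
    have h := pv_fold_set_getElem ((pvBuildPositions all).getD g0 []) (all.map f) hnn i him
    have hL : (((pvBuildPositions all).getD g0 []).foldl
        (fun r p => PySem.List.pySetD r p 1) (all.map f))[i]'hi1
        = if (i : Int) ∈ (pvBuildPositions all).getD g0 [] then 1 else (all.map f)[i]'him :=
      Option.some.inj (by rw [← List.getElem?_eq_getElem hi1, h])
    rw [hL, List.getElem_map, List.getElem_map]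
    by_cases hm : (i : Int) ∈ (pvBuildPositions all).getD g0 []
    · rcases (pv_mem_pos all g0 _).mp hm with ⟨k, hk, hik, hg⟩
      have : k = i := by omega
      subst this
      simp [hm, hg]
    · have : ¬ all[i] = g0 := by
        intro h'
        exact hm ((pv_mem_pos all g0 _).mpr ⟨i, hia, rfl, h'⟩)
      simp only [hm, if_false]
      rw [if_neg (by simpa using this)]

-- loop over book_genre_list: invariant over the processed prefix
theorem pv_inv (all : List String) (bs : List String) (seen : List String) :
    bs.foldl (fun r genre => (((pvBuildPositions all).getD genre []).foldl
        (fun r p => PySem.List.pySetD r p 1) r))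
      (all.map (fun g => if seen.contains g then (1 : Int) else 0))
      = all.map (fun g => if (seen ++ bs).contains g then 1 else 0) := by
  induction bs generalizing seen with
  | nil => simp
  | cons b bs ih =>
    rw [List.foldl_cons, pv_step_map]
    have hfun : (fun g => if g == b then (1 : Int) else if seen.contains g then 1 else 0)
        = (fun g => if (seen ++ [b]).contains g then 1 else 0) := by
      funext g
      simp only [List.contains_append]
      by_cases h1 : g == b <;> by_cases h2 : seen.contains g <;>
        simp_all [List.contains_eq_mem]
    rw [hfun, ih (seen ++ [b])]
    simp

-- ===== VERDICT (by name: the statement is the Claim_ definition above) =====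
theorem genre_binary_spec : Claim_equal_genre_binary := by
  intro book all _
  unfold Spec_genre_binary genre_binary genre_binary_alt
  -- A side: conditional appends are an append of a conditional, then a map
  have hA : (fun (binary_list : List Int) (genre : String) =>
        if book.contains genre then binary_list ++ [(1 : Int)] else binary_list ++ [(0 : Int)])
      = (fun binary_list genre => binary_list ++ [if book.contains genre then (1 : Int) else 0]) := by
    funext acc g
    by_cases h : g ∈ book <;> simp [h]
  rw [hA, PySem.List.foldl_append_singleton_eq_map]
  -- B side: the zero vector is the map for the empty processed prefix
  have hz : List.replicate all.length (0 : Int)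
      = all.map (fun g => if ([] : List String).contains g then (1 : Int) else 0) := by
    simp [List.map_const']
  simp only [hz, pv_inv all book []]
  simp
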